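-- pv_equiv track=rewrite | github.com/nanditha-varma/os | main.py | fcfs_disk_scheduling
-- ===== SOURCE A (Python) =====
-- def fcfs_disk_scheduling(requests, head):
--     total_head_movements = 0
--     sequence = []
--
--     for request in requests:
--         total_head_movements += abs(head - request)
--         head = request
--         sequence.append(request)
--
--     return total_head_movements, sequence
-- ===== SOURCE B (Python) =====
-- def fcfs_disk_scheduling(requests, head):
--     # Divide and conquer: movement over a block of requests starting at h is
--     # movement over the left half from h plus movement over the right half
--     # starting from the last request of the left half.
--     def solve(reqs, h):
--         if len(reqs) <= 1:
--             return abs(h - reqs[0]) if reqs else 0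
--         mid = len(reqs) // 2
--         left, right = reqs[:mid], reqs[mid:]
--         return solve(left, h) + solve(right, left[-1])
--     return solve(list(requests), head), list(requests)
-- ===== Notes on version B (the rewrite author's own statement) =====
-- stated objective: alternative
-- what changed: Replaces the single head-updating accumulator loop with a divide-and-conquer recursion: split the request block in half, solve each half independently (the right half starting from the left half's last request), and add the two totals; the served sequence is materialized separately as list(requests).
import Mathlib
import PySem

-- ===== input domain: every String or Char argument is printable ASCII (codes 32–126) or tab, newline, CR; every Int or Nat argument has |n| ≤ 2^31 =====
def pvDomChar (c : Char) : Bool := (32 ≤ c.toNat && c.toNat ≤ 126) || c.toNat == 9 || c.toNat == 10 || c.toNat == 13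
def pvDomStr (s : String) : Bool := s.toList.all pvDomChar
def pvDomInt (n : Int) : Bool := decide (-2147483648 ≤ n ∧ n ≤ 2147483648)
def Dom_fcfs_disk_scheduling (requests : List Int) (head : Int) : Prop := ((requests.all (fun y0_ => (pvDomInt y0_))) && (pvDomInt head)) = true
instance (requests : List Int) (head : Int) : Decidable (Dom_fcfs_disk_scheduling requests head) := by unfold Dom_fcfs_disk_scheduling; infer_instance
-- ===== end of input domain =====

-- B replaces A's head-updating accumulator loop by a divide-and-conquer recursion over the request block.

-- ===== PORT A =====
-- A: one loop threading (total, head, sequence) over requests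
def fcfs_disk_scheduling (requests : List Int) (head : Int) : Int × List Int :=
  let st := requests.foldl
    (fun (st : Int × Int × List Int) request =>
      (st.1 + (st.2.1 - request).natAbs, request, st.2.2 ++ [request]))
    (0, head, [])
  (st.1, st.2.2)

-- ===== PORT B =====
-- B helper 'solve': divide and conquer on the block of requests.
-- left[-1] is ported as getLastD 0: exact, since mid = len/2 ≥ 1 in that branch so left ≠ [].
def pvSolve (reqs : List Int) (h : Int) : Int :=
  if reqs.length ≤ 1 then
    match reqs with
    | [] => 0
    | x :: _ => ((h - x).natAbs : Int)
  else
    let mid := reqs.length / 2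
    let left := reqs.take mid
    let right := reqs.drop mid
    pvSolve left h + pvSolve right (left.getLastD 0)
termination_by reqs.length
decreasing_by
  · simp only [List.length_take]; omega
  · simp only [List.length_drop]; omega

def fcfs_disk_scheduling_alt (requests : List Int) (head : Int) : Int × List Int :=
  (pvSolve requests head, requests)

-- ===== PRECONDITION & SPEC =====
def Spec_fcfs_disk_scheduling (requests : List Int) (head : Int) (out : Int × List Int) : Prop := out = fcfs_disk_scheduling_alt requests head
instance (requests : List Int) (head : Int) (out : Int × List Int) : Decidable (Spec_fcfs_disk_scheduling requests head out) := by unfold Spec_fcfs_disk_scheduling; infer_instance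

-- ===== CLAIM (what is proved, stated in full; the proofs are below) =====
def Claim_equal_fcfs_disk_scheduling : Prop := ∀ (requests : List Int) (head : Int), Dom_fcfs_disk_scheduling requests head → Spec_fcfs_disk_scheduling requests head (fcfs_disk_scheduling requests head)

-- ===== LEMMAS AND PROOFS =====
-- Reference path-sum: total movement serving l in order starting from h.
def pvPathSum (h : Int) (l : List Int) : Int :=
  match l with
  | [] => 0
  | x :: xs => ((h - x).natAbs : Int) + pvPathSum x xs

lemma pvPathSum_append (a b : List Int) (h : Int) :
    pvPathSum h (a ++ b) = pvPathSum h a + pvPathSum (a.getLastD h) b := by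
  induction a generalizing h with
  | nil => simp [pvPathSum]
  | cons x xs ih =>
    simp only [List.cons_append, pvPathSum, ih x, List.getLastD_cons]
    ring

lemma pvSolve_eq_pathSum (reqs : List Int) (h : Int) : pvSolve reqs h = pvPathSum h reqs := by
  rw [pvSolve.eq_def]
  by_cases hle : reqs.length ≤ 1
  · rw [if_pos hle]
    match reqs, hle with
    | [], _ => simp [pvPathSum]
    | [x], _ => simp [pvPathSum]
  · rw [if_neg hle]
    show pvSolve (reqs.take (reqs.length / 2)) h
        + pvSolve (reqs.drop (reqs.length / 2)) ((reqs.take (reqs.length / 2)).getLastD 0)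
        = pvPathSum h reqs
    have h1 : (reqs.take (reqs.length / 2)).length < reqs.length := by
      simp only [List.length_take]; omega
    have h2 : (reqs.drop (reqs.length / 2)).length < reqs.length := by
      simp only [List.length_drop]; omega
    rw [pvSolve_eq_pathSum, pvSolve_eq_pathSum]
    have hne : reqs.take (reqs.length / 2) ≠ [] := by
      simp only [← List.length_pos_iff, List.length_take]; omega
    have hap := pvPathSum_append (reqs.take (reqs.length / 2)) (reqs.drop (reqs.length / 2)) h
    rw [List.take_append_drop] at hap
    rw [hap, List.getLastD_eq_getLast?, List.getLastD_eq_getLast?,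
        List.getLast?_eq_some_getLast hne]
    simp
termination_by reqs.length

lemma fcfs_foldl_char (requests : List Int) (head : Int) (t : Int) (acc : List Int) :
    requests.foldl
      (fun (st : Int × Int × List Int) request =>
        (st.1 + (st.2.1 - request).natAbs, request, st.2.2 ++ [request]))
      (t, head, acc)
    = (t + pvPathSum head requests, (head :: requests).getLast (by simp), acc ++ requests) := by
  induction requests generalizing head t acc with
  | nil => simp [pvPathSum]
  | cons x xs ih =>
    simp only [List.foldl_cons, ih, pvPathSum, Prod.mk.injEq]
    refine ⟨by ring, ?_, by simp⟩
    cases xs <;> simp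

-- ===== VERDICT (by name: the statement is the Claim_ definition above) =====
theorem fcfs_disk_scheduling_spec : Claim_equal_fcfs_disk_scheduling := by
  intro requests head _
  unfold Spec_fcfs_disk_scheduling fcfs_disk_scheduling fcfs_disk_scheduling_alt
  simp only [fcfs_foldl_char, pvSolve_eq_pathSum]
  simp
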